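-- pv_equiv track=rewrite | github.com/savorywatt/repo-sapiens | repo_sapiens/providers/external_agent.py | _extract_question
-- ===== SOURCE A (Python) =====
-- def _extract_question(output: str) -> str | None:
--     """Extract question from agent output."""
--     if "BUILDER_QUESTION:" not in output:
--         return None
--
--     lines = output.split("\n")
--     for line in lines:
--         if "BUILDER_QUESTION:" in line:
--             return line.split("BUILDER_QUESTION:", 1)[1].strip()
--
--     return None
-- ===== SOURCE B (Python) =====
-- def _extract_question(output):
--     """Extract question from agent output (locate-and-slice, no line materialization)."""
--     marker = "BUILDER_QUESTION:"
--     idx = output.find(marker)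
--     if idx == -1:
--         return None
--     end = output.find("\n", idx)
--     if end == -1:
--         end = len(output)
--     return output[idx + len(marker):end].strip()
-- ===== Notes on version B (the rewrite author's own statement) =====
-- stated objective: simpler
-- what changed: A pre-checks containment, splits the whole output into a list of lines and loops over them re-scanning each line for the marker; B does a single locate-then-slice on the raw string: find the first 'BUILDER_QUESTION:', find the next newline after it, slice and strip, with no line list materialized.
import Mathlib
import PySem

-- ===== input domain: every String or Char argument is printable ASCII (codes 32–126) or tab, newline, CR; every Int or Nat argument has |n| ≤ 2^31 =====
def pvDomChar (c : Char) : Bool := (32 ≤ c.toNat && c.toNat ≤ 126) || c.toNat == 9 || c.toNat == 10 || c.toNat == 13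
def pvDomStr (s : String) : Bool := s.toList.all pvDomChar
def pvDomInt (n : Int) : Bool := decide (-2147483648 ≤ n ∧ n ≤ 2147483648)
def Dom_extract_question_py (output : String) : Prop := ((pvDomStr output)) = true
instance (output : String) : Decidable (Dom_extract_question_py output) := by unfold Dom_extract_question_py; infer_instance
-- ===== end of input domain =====

-- B replaces A's containment pre-check + split-into-lines loop with a direct locate-then-slice on the
-- raw string (find marker, find next newline, slice, strip); objective: simpler (no line list is built).

-- ===== PORT A =====
def pvLinesLoop : List String → Option String
  | [] => none
  | line :: rest =>
    if PySem.Str.isIn "BUILDER_QUESTION:" line then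
      some (PySem.Str.strip (PySem.List.pyGetD
        ((PySem.Str.splitMax? line "BUILDER_QUESTION:" 1).getD []) 1 ""))
    else pvLinesLoop rest

def extract_question_py (output : String) : Option String :=
  if ¬ PySem.Str.isIn "BUILDER_QUESTION:" output then none
  else pvLinesLoop ((PySem.Str.split? output "\n").getD [])

def extract_question_py_alt (output : String) : Option String :=
  let idx := PySem.Str.find output "BUILDER_QUESTION:"
  if idx = -1 then none
  else
    let e := PySem.Str.findFrom output "\n" idx
    let e2 := if e = -1 then PySem.Str.len output else e
    some (PySem.Str.strip (PySem.Str.slice output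
      (some (idx + PySem.Str.len "BUILDER_QUESTION:")) (some e2)))

-- ===== PRECONDITION & SPEC =====
def Spec_extract_question_py (output : String) (out : Option String) : Prop := out = extract_question_py_alt output
instance (output : String) (out : Option String) : Decidable (Spec_extract_question_py output out) := by unfold Spec_extract_question_py; infer_instance

-- ===== CLAIM (what is proved, stated in full; the proofs are below) =====
def Claim_equal_extract_question_py : Prop := ∀ (output : String), Dom_extract_question_py output → Spec_extract_question_py output (extract_question_py output)

-- ===== LEMMAS AND PROOFS =====
def pvM : List Char := "BUILDER_QUESTION:".toList
lemma pvM_ne_nil : pvM ≠ [] := by decide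
lemma pvM_len : pvM.length = 17 := by decide
lemma pvM_no_nl : '\n' ∉ pvM := by decide

lemma pv_find_eq_iff {s sub : List Char} {j : Nat} (hocc : sub <+: s.drop j)
    (hmin : ∀ i < j, ¬ sub <+: s.drop i) : PySem.Chars.find s sub = (j : Int) := by
  have hin : PySem.Chars.isIn sub s = true :=
    (PySem.Chars.exists_prefix_drop_iff_isIn sub s).mp ⟨j, hocc⟩
  have hnn : 0 ≤ PySem.Chars.find s sub :=
    (PySem.Chars.find_nonneg_iff s sub).mpr ((PySem.Chars.isIn_iff_infix sub s).mp hin)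
  obtain ⟨h1, h2⟩ := PySem.Chars.find_spec hnn
  have hfj : (PySem.Chars.find s sub).toNat = j := by
    rcases Nat.lt_trichotomy (PySem.Chars.find s sub).toNat j with h | h | h
    · exact absurd h1 (hmin _ h)
    · exact h
    · exact absurd hocc (h2 j h)
  omega

lemma pv_singleton_prefix_iff (c : Char) (xs : List Char) : [c] <+: xs ↔ xs.head? = some c := by
  cases xs with
  | nil => simp
  | cons a t => simp [List.cons_prefix_cons]; exact eq_comm

lemma pv_cross {L t : List Char} {j : Nat} (hj : j ≤ L.length) :
    pvM <+: (L ++ '\n' :: t).drop j ↔ pvM <+: L.drop j := by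
  rw [List.drop_append_of_le_length hj]
  constructor
  · intro h
    by_cases hl : pvM.length ≤ (L.drop j).length
    · exact (List.isPrefix_append_of_length hl).mp h
    · exfalso
      rw [not_le] at hl
      have hlen : (L.drop j).length < ((L.drop j) ++ '\n' :: t).length := by
        simp
      have hget := List.IsPrefix.getElem h (i := (L.drop j).length) hl
      rw [List.getElem_append_right (le_refl (L.drop j).length)] at hget
      have hm : pvM[(L.drop j).length]'hl ∈ pvM := List.getElem_mem hl
      rw [hget] at hm
      simp at hm
      exact pvM_no_nl hm
  · intro h
    exact h.trans (List.prefix_append _ _)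

lemma pv_drop_right (L t : List Char) (k : Nat) :
    (L ++ '\n' :: t).drop (L.length + 1 + k) = t.drop k := by
  rw [show L ++ '\n' :: t = (L ++ ['\n']) ++ t by simp,
      show L.length + 1 + k = (L ++ ['\n']).length + k by simp]
  exact List.drop_length_add_append k

lemma pv_occ_iff {L t : List Char} :
    (∃ j, pvM <+: (L ++ '\n' :: t).drop j) ↔ (∃ j, pvM <+: L.drop j) ∨ (∃ j, pvM <+: t.drop j) := by
  constructor
  · rintro ⟨j, hj⟩
    by_cases h : j ≤ L.length
    · exact Or.inl ⟨j, (pv_cross h).mp hj⟩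
    · right
      refine ⟨j - L.length - 1, ?_⟩
      rwa [show j = L.length + 1 + (j - L.length - 1) by omega, pv_drop_right] at hj
  · rintro (⟨j, hj⟩ | ⟨j, hj⟩)
    · have hjl : j ≤ L.length := by
        by_contra h
        rw [List.drop_eq_nil_of_le (by omega)] at hj
        exact pvM_ne_nil (List.prefix_nil.mp hj)
      exact ⟨j, (pv_cross hjl).mpr hj⟩
    · exact ⟨L.length + 1 + j, by rwa [pv_drop_right]⟩

lemma pv_isIn_append {L t : List Char} :
    PySem.Chars.isIn pvM (L ++ '\n' :: t) = (PySem.Chars.isIn pvM L || PySem.Chars.isIn pvM t) := by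
  have hiff : PySem.Chars.isIn pvM (L ++ '\n' :: t) = true ↔
      (PySem.Chars.isIn pvM L = true ∨ PySem.Chars.isIn pvM t = true) := by
    rw [← PySem.Chars.exists_prefix_drop_iff_isIn, ← PySem.Chars.exists_prefix_drop_iff_isIn,
        ← PySem.Chars.exists_prefix_drop_iff_isIn]
    exact pv_occ_iff
  rcases h : PySem.Chars.isIn pvM L <;> rcases h2 : PySem.Chars.isIn pvM t <;> simp_all

lemma pv_find_append_left {L t : List Char} (h : PySem.Chars.isIn pvM L = true) :
    PySem.Chars.find (L ++ '\n' :: t) pvM = PySem.Chars.find L pvM := by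
  have hnn : 0 ≤ PySem.Chars.find L pvM :=
    (PySem.Chars.find_nonneg_iff L pvM).mpr ((PySem.Chars.isIn_iff_infix pvM L).mp h)
  obtain ⟨h1, h2⟩ := PySem.Chars.find_spec hnn
  set f := (PySem.Chars.find L pvM).toNat with hf
  have hfl : f ≤ L.length := by
    have := PySem.Chars.find_le_length L pvM
    omega
  have : PySem.Chars.find (L ++ '\n' :: t) pvM = (f : Int) := by
    apply pv_find_eq_iff
    · exact (pv_cross hfl).mpr h1
    · intro i hi
      rw [pv_cross (by omega)]
      exact h2 i hi
  omega

lemma pv_find_append_right {L t : List Char} (hL : PySem.Chars.isIn pvM L = false)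
    (ht : PySem.Chars.isIn pvM t = true) :
    PySem.Chars.find (L ++ '\n' :: t) pvM = (L.length : Int) + 1 + PySem.Chars.find t pvM := by
  have hnn : 0 ≤ PySem.Chars.find t pvM :=
    (PySem.Chars.find_nonneg_iff t pvM).mpr ((PySem.Chars.isIn_iff_infix pvM t).mp ht)
  obtain ⟨h1, h2⟩ := PySem.Chars.find_spec hnn
  set f := (PySem.Chars.find t pvM).toNat with hf
  have : PySem.Chars.find (L ++ '\n' :: t) pvM = ((L.length + 1 + f : Nat) : Int) := by
    apply pv_find_eq_iff
    · rw [pv_drop_right]; exact h1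
    · intro i hi hpre
      by_cases hil : i ≤ L.length
      · rw [pv_cross hil] at hpre
        have : PySem.Chars.isIn pvM L = true :=
          (PySem.Chars.exists_prefix_drop_iff_isIn pvM L).mp ⟨i, hpre⟩
        simp_all
      · rw [show i = L.length + 1 + (i - L.length - 1) by omega, pv_drop_right] at hpre
        exact h2 _ (by omega) hpre
  omega

lemma pv_find_nl_none {s : List Char} (h : '\n' ∉ s) : PySem.Chars.find s ['\n'] = -1 := by
  rw [PySem.Chars.find_eq_neg_one_iff]
  intro hc
  exact h (hc.subset (by simp))

lemma pv_find_nl {L t : List Char} (h : '\n' ∉ L) :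
    PySem.Chars.find (L ++ '\n' :: t) ['\n'] = (L.length : Int) := by
  apply pv_find_eq_iff
  · rw [List.drop_append_of_le_length le_rfl]
    simp
  · intro i hi hpre
    rw [List.drop_append_of_le_length (le_of_lt hi), pv_singleton_prefix_iff] at hpre
    rcases hd : L.drop i with _ | ⟨a, u⟩
    · have := congrArg List.length hd
      simp at this
      omega
    · rw [hd] at hpre
      simp at hpre
      have : '\n' ∈ L.drop i := by rw [hd, ← hpre]; exact List.mem_cons_self ..
      exact h (List.mem_of_mem_drop this)

def pvLines : List Char → List (List Char)
  | [] => [[]]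
  | c :: t =>
    if c = '\n' then [] :: pvLines t
    else
      match pvLines t with
      | [] => [[c]]
      | x :: xs => (c :: x) :: xs

lemma pvLines_ne_nil (s : List Char) : pvLines s ≠ [] := by
  cases s with
  | nil => simp [pvLines]
  | cons c t =>
    rw [pvLines]
    split
    · simp
    · split <;> simp

lemma pv_splitOn_go (fuel : Nat) : ∀ (l cur : List Char) (acc : List (List Char)),
    l.length < fuel →
    PySem.Chars.splitOn.go ['\n'] fuel l cur acc
      = acc.reverse ++ (match pvLines l with
          | [] => [cur.reverse]
          | x :: xs => (cur.reverse ++ x) :: xs) := by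
  induction fuel with
  | zero => intro l cur acc h; omega
  | succ fuel IH =>
    intro l cur acc h
    cases l with
    | nil =>
      rw [PySem.Chars.splitOn.go]
      all_goals first
      | omega
      | simp [pvLines]
    | cons c rest =>
      by_cases hc : c = '\n'
      · subst hc
        rw [PySem.Chars.splitOn.go]
        simp only [List.isPrefixOf, BEq.rfl, Bool.true_and, if_pos,
          List.length_cons, List.length_nil, Nat.zero_add, List.drop_succ_cons, List.drop_zero]
        rw [IH rest [] (cur.reverse :: acc) (by simp at h; omega)]
        rcases hp : pvLines rest with _ | ⟨x, xs⟩
        · exact absurd hp (pvLines_ne_nil rest)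
        · simp [pvLines, hp]
      · rw [PySem.Chars.splitOn.go]
        have hpf : List.isPrefixOf ['\n'] (c :: rest) = false := by
          simp [List.isPrefixOf]
          exact fun hx => absurd hx.symm hc
        rw [hpf]
        simp only [Bool.false_eq_true, if_false]
        rw [IH rest (c :: cur) acc (by simp at h ⊢; omega)]
        rcases hp : pvLines rest with _ | ⟨x, xs⟩
        · exact absurd hp (pvLines_ne_nil rest)
        · simp [pvLines, hp, hc]

lemma pv_splitOn_eq (s : List Char) : PySem.Chars.splitOn s ['\n'] = pvLines s := by
  rw [PySem.Chars.splitOn, pv_splitOn_go (s.length + 1) s [] [] (by omega)]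
  rcases hp : pvLines s with _ | ⟨x, xs⟩
  · exact absurd hp (pvLines_ne_nil s)
  · simp

lemma pvLines_no_nl {s : List Char} (h : '\n' ∉ s) : pvLines s = [s] := by
  induction s with
  | nil => simp [pvLines]
  | cons c t IH =>
    simp at h
    rw [pvLines, if_neg (fun hx => h.1 hx.symm), IH h.2]

lemma pvLines_append {L : List Char} (t : List Char) (h : '\n' ∉ L) :
    pvLines (L ++ '\n' :: t) = L :: pvLines t := by
  induction L with
  | nil => simp [pvLines]
  | cons c L' IH =>
    simp at h
    rw [List.cons_append, pvLines, if_neg (fun hx => h.1 hx.symm), IH h.2]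

lemma pv_splitOnMax_go0 (fuel : Nat) (l cur : List Char) (acc : List (List Char)) :
    PySem.Chars.splitOnMax.go pvM fuel 0 l cur acc = acc.reverse ++ [cur.reverse ++ l] := by
  cases fuel with
  | zero => rw [PySem.Chars.splitOnMax.go] <;> simp
  | succ fuel =>
    cases l with
    | nil => rw [PySem.Chars.splitOnMax.go] <;> simp
    | cons c rest => rw [PySem.Chars.splitOnMax.go] <;> simp

lemma pv_splitOnMax_go1 : ∀ (P : List Char) (fuel : Nat) (cur R : List Char) (acc : List (List Char)),
    (P ++ pvM ++ R).length < fuel →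
    (∀ j < P.length, ¬ pvM <+: (P ++ pvM ++ R).drop j) →
    PySem.Chars.splitOnMax.go pvM fuel 1 (P ++ pvM ++ R) cur acc
      = acc.reverse ++ [cur.reverse ++ P, R] := by
  intro P
  induction P with
  | nil =>
    intro fuel cur R acc hfuel _
    cases fuel with
    | zero => simp at hfuel
    | succ fuel =>
      obtain ⟨m0, M', hM⟩ : ∃ c cs, pvM = c :: cs := by
        rcases hp : pvM with _ | ⟨c, cs⟩
        · exact absurd hp pvM_ne_nil
        · exact ⟨c, cs, rfl⟩
      simp only [List.nil_append]
      rw [show pvM ++ R = m0 :: (M' ++ R) from by rw [hM]; simp]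
      rw [PySem.Chars.splitOnMax.go]
      rw [show (m0 :: (M' ++ R)) = pvM ++ R from by rw [hM]; simp]
      rw [show pvM.isPrefixOf (pvM ++ R) = true from
        List.isPrefixOf_iff_prefix.mpr (List.prefix_append _ _)]
      rw [if_neg (by omega : ¬ (1 : Nat) = 0)]
      simp only [if_pos]
      rw [List.drop_left, pv_splitOnMax_go0]
      simp
  | cons c P' IH =>
    intro fuel cur R acc hfuel hmin
    cases fuel with
    | zero => simp at hfuel
    | succ fuel =>
      rw [List.cons_append, List.cons_append, PySem.Chars.splitOnMax.go]
      have hnp : pvM.isPrefixOf (c :: (P' ++ pvM ++ R)) = false := by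
        rw [show c :: (P' ++ pvM ++ R) = ((c :: P') ++ pvM ++ R).drop 0 from by simp]
        rcases hx : pvM.isPrefixOf (((c :: P') ++ pvM ++ R).drop 0) with _ | _
        · rfl
        · exact absurd (List.isPrefixOf_iff_prefix.mp hx) (hmin 0 (by simp))
      rw [if_neg (by omega : ¬ (1 : Nat) = 0), hnp]
      simp only [Bool.false_eq_true, if_false]
      rw [IH fuel (c :: cur) R acc (by simp at hfuel ⊢; omega)
        (fun j hj => by
          have := hmin (j + 1) (by simp; omega)
          simpa using this)]
      simp

lemma pv_splitOnMax_one {L : List Char} {f : Nat} (hocc : pvM <+: L.drop f)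
    (hmin : ∀ i < f, ¬ pvM <+: L.drop i) :
    PySem.Chars.splitOnMax L pvM 1 = [L.take f, L.drop (f + 17)] := by
  obtain ⟨R, hR⟩ := hocc
  have hfle : f ≤ L.length := by
    by_contra hc
    rw [List.drop_eq_nil_of_le (by omega)] at hR
    have := congrArg List.length hR
    simp [pvM_len] at this
  have hL : L = L.take f ++ pvM ++ R := by
    rw [List.append_assoc, hR, List.take_append_drop]
  have hRd : R = L.drop (f + 17) := by
    have : (pvM ++ R).drop pvM.length = (L.drop f).drop pvM.length := by rw [hR]
    rw [List.drop_left, List.drop_drop] at this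
    rw [this, pvM_len, Nat.add_comm]
  have hlen : (L.take f).length = f := by simp; omega
  have hgo := pv_splitOnMax_go1 (L.take f) (L.length + 1) [] R []
    (by rw [← hL]; omega)
    (fun j hj => by rw [← hL]; exact hmin j (by rw [hlen] at hj; omega))
  rw [PySem.Chars.splitOnMax, if_neg (by omega : ¬ (1 : Int) < 0),
    show (1 : Int).toNat = 1 from rfl,
    show PySem.Chars.splitOnMax.go pvM (L.length + 1) 1 L [] []
        = PySem.Chars.splitOnMax.go pvM (L.length + 1) 1 (L.take f ++ pvM ++ R) [] [] from by rw [← hL],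
    hgo, ← hRd]
  simp

lemma pv_first_nl {s : List Char} (h : '\n' ∈ s) :
    ∃ L t, s = L ++ '\n' :: t ∧ '\n' ∉ L := by
  induction s with
  | nil => simp at h
  | cons c t IH =>
    by_cases hc : c = '\n'
    · exact ⟨[], t, by rw [hc]; rfl, by simp⟩
    · rcases IH (by rcases List.mem_cons.mp h with h | h; exact absurd h.symm hc; exact h) with ⟨L, u, hs, hL⟩
      exact ⟨c :: L, u, by rw [hs]; rfl, by simp [hL]; exact fun hx => hc hx.symm⟩

def pvLoopA : List (List Char) → Option (List Char)
  | [] => none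
  | L :: rest =>
    if PySem.Chars.isIn pvM L then
      some (PySem.Chars.strip (PySem.List.pyGetD (PySem.Chars.splitOnMax L pvM 1) 1 []))
    else pvLoopA rest

def pvCharA (s : List Char) : Option (List Char) :=
  if ¬ PySem.Chars.isIn pvM s then none
  else pvLoopA (PySem.Chars.splitOn s ['\n'])

def pvCharB (s : List Char) : Option (List Char) :=
  if PySem.Chars.find s pvM = -1 then none
  else
    some (PySem.Chars.strip (PySem.List.slice s
      (some (PySem.Chars.find s pvM + 17))
      (some (if PySem.Chars.findFrom s ['\n'] (PySem.Chars.find s pvM) = -1 then (s.length : Int)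
             else PySem.Chars.findFrom s ['\n'] (PySem.Chars.find s pvM)))))

lemma pv_getD_pair (a b : List Char) : PySem.List.pyGetD [a, b] 1 [] = b := by
  simp [PySem.List.pyGetD, PySem.List.pyGet?, PySem.List.pyIdx?]

lemma pv_e2 (r : Int) (hr : -1 ≤ r) (k len : Nat) :
    (if (if r = -1 then -1 else ((k : Nat) : Int) + r) = -1 then ((len : Nat) : Int)
     else (if r = -1 then -1 else ((k : Nat) : Int) + r))
      = (if r = -1 then ((len : Nat) : Int) else ((k : Nat) : Int) + r) := by
  by_cases h : r = -1
  · simp [h]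
  · rw [if_neg h, if_neg h, if_neg (by omega)]

lemma pv_char_main (n : Nat) : ∀ s : List Char, s.length ≤ n → pvCharA s = pvCharB s := by
  induction n with
  | zero =>
    intro s hs
    have hnil : s = [] := List.length_eq_zero_iff.mp (by omega)
    subst hnil
    decide
  | succ n IH =>
    intro s hs
    by_cases hnl : '\n' ∈ s
    · obtain ⟨L, t, rfl, hL⟩ := pv_first_nl hnl
      by_cases hiL : PySem.Chars.isIn pvM L = true
      · -- first line containing the marker is L
        have hnn : 0 ≤ PySem.Chars.find L pvM :=
          (PySem.Chars.find_nonneg_iff L pvM).mpr ((PySem.Chars.isIn_iff_infix pvM L).mp hiL)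
        set f := (PySem.Chars.find L pvM).toNat with hfdef
        have hfe : PySem.Chars.find L pvM = (f : Int) := by omega
        obtain ⟨h1, h2⟩ := PySem.Chars.find_spec hnn
        have hlen : f + 17 ≤ L.length := by
          have hle := h1.length_le
          rw [pvM_len] at hle
          simp at hle
          omega
        have hA : pvCharA (L ++ '\n' :: t) = some (PySem.Chars.strip (L.drop (f + 17))) := by
          rw [pvCharA, if_neg (not_not_intro (by rw [pv_isIn_append, hiL]; simp)),
            pv_splitOn_eq, pvLines_append t hL, pvLoopA, if_pos hiL,
            pv_splitOnMax_one h1 h2, pv_getD_pair]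
        have hB : pvCharB (L ++ '\n' :: t) = some (PySem.Chars.strip (L.drop (f + 17))) := by
          rw [pvCharB, pv_find_append_left hiL, hfe, if_neg (by omega),
            PySem.Chars.findFrom_natCast _ ['\n'] f (by simp; omega),
            List.drop_append_of_le_length (by omega : f ≤ L.length),
            pv_find_nl (fun hm => hL (List.mem_of_mem_drop hm))]
          simp only [List.length_drop]
          rw [if_neg (by omega), if_neg (by omega),
            show ((f : Int) + 17) = ((f + 17 : Nat) : Int) from by push_cast; ring,
            show ((f : Int) + ((L.length - f : Nat) : Int)) = ((L.length : Nat) : Int) from by omega,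
            PySem.List.slice_natCast,
            List.drop_append_of_le_length (by omega : f + 17 ≤ L.length),
            List.take_left' (by simp)]
        rw [hA, hB]
      · have hiL' : PySem.Chars.isIn pvM L = false := by simp [hiL]
        by_cases hit : PySem.Chars.isIn pvM t = true
        · have hnnt : 0 ≤ PySem.Chars.find t pvM :=
            (PySem.Chars.find_nonneg_iff t pvM).mpr ((PySem.Chars.isIn_iff_infix pvM t).mp hit)
          set ft := (PySem.Chars.find t pvM).toNat with hftdef
          have hfte : PySem.Chars.find t pvM = (ft : Int) := by omega
          obtain ⟨h1, h2⟩ := PySem.Chars.find_spec hnnt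
          have hlent : ft + 17 ≤ t.length := by
            have hle := h1.length_le
            rw [pvM_len] at hle
            simp at hle
            omega
          have hslen : (L ++ '\n' :: t).length = L.length + 1 + t.length := by simp; omega
          have hA : pvCharA (L ++ '\n' :: t) = pvCharA t := by
            rw [pvCharA, pvCharA,
              if_neg (not_not_intro (by rw [pv_isIn_append, hit]; simp)),
              if_neg (not_not_intro hit),
              pv_splitOn_eq, pv_splitOn_eq, pvLines_append t hL, pvLoopA, if_neg (by simp [hiL'])]
          have hfinds : PySem.Chars.find (L ++ '\n' :: t) pvM
              = ((L.length + 1 + ft : Nat) : Int) := by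
            rw [pv_find_append_right hiL' hit, hfte]
            push_cast
            ring
          have hB : pvCharB (L ++ '\n' :: t) = pvCharB t := by
            rw [pvCharB, pvCharB, hfinds, hfte,
              if_neg (show ¬(((L.length + 1 + ft : Nat) : Int) = -1) from by omega),
              if_neg (show ¬(((ft : Nat) : Int) = -1) from by omega),
              PySem.Chars.findFrom_natCast _ ['\n'] (L.length + 1 + ft) (by omega),
              PySem.Chars.findFrom_natCast _ ['\n'] ft (by omega),
              pv_drop_right]
            set r' := PySem.Chars.find (List.drop ft t) ['\n'] with hr'def
            have hr'ge : -1 ≤ r' := PySem.Chars.neg_one_le_find _ _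
            rw [pv_e2 r' hr'ge (L.length + 1 + ft) (L ++ '\n' :: t).length,
              pv_e2 r' hr'ge ft t.length]
            by_cases hr : r' = -1
            · rw [if_pos hr, if_pos hr, hslen,
                show (((L.length + 1 + ft : Nat) : Int) + 17) = ((L.length + 1 + ft + 17 : Nat) : Int) from by push_cast; ring,
                show ((ft : Int) + 17) = ((ft + 17 : Nat) : Int) from by push_cast; ring,
                PySem.List.slice_natCast, PySem.List.slice_natCast,
                show L.length + 1 + ft + 17 = L.length + 1 + (ft + 17) from by omega,
                pv_drop_right]
              congr 3
              omega
            · have hrpos : 0 ≤ r' := by omega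
              have hre : r' = ((r'.toNat : Nat) : Int) := by omega
              rw [if_neg hr, if_neg hr, hre,
                show (((L.length + 1 + ft : Nat) : Int) + ((r'.toNat : Nat) : Int)) = ((L.length + 1 + ft + r'.toNat : Nat) : Int) from by push_cast; ring,
                show (((L.length + 1 + ft : Nat) : Int) + 17) = ((L.length + 1 + ft + 17 : Nat) : Int) from by push_cast; ring,
                show (((ft : Nat) : Int) + ((r'.toNat : Nat) : Int)) = ((ft + r'.toNat : Nat) : Int) from by push_cast; ring,
                show (((ft : Nat) : Int) + 17) = ((ft + 17 : Nat) : Int) from by push_cast; ring,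
                PySem.List.slice_natCast, PySem.List.slice_natCast,
                show L.length + 1 + ft + 17 = L.length + 1 + (ft + 17) from by omega,
                pv_drop_right]
              congr 3
              omega
          rw [hA, hB]
          exact IH t (by omega)
        · have hit' : PySem.Chars.isIn pvM t = false := by simp [hit]
          have hsin : PySem.Chars.isIn pvM (L ++ '\n' :: t) = false := by
            rw [pv_isIn_append, hiL', hit']
            rfl
          have hfind : PySem.Chars.find (L ++ '\n' :: t) pvM = -1 := by
            by_contra hc
            rw [show PySem.Chars.isIn pvM (L ++ '\n' :: t)
                = (PySem.Chars.find (L ++ '\n' :: t) pvM != -1) from rfl] at hsin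
            simp [hc] at hsin
          rw [pvCharA, if_pos (by simp [hsin]), pvCharB, if_pos hfind]
    · -- single line: no newline in s
      by_cases hin : PySem.Chars.isIn pvM s = true
      · have hnn : 0 ≤ PySem.Chars.find s pvM :=
          (PySem.Chars.find_nonneg_iff s pvM).mpr ((PySem.Chars.isIn_iff_infix pvM s).mp hin)
        set f := (PySem.Chars.find s pvM).toNat with hfdef
        have hfe : PySem.Chars.find s pvM = (f : Int) := by omega
        obtain ⟨h1, h2⟩ := PySem.Chars.find_spec hnn
        have hlen : f + 17 ≤ s.length := by
          have hle := h1.length_le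
          rw [pvM_len] at hle
          simp at hle
          omega
        have hA : pvCharA s = some (PySem.Chars.strip (s.drop (f + 17))) := by
          rw [pvCharA, if_neg (not_not_intro hin), pv_splitOn_eq, pvLines_no_nl hnl,
            pvLoopA, if_pos hin, pv_splitOnMax_one h1 h2, pv_getD_pair]
        have hB : pvCharB s = some (PySem.Chars.strip (s.drop (f + 17))) := by
          rw [pvCharB, hfe, if_neg (by omega),
            PySem.Chars.findFrom_natCast s ['\n'] f (by omega),
            pv_find_nl_none (fun hm => hnl (List.mem_of_mem_drop hm)),
            if_pos rfl, if_pos rfl,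
            show ((f : Int) + 17) = ((f + 17 : Nat) : Int) from by push_cast; ring,
            PySem.List.slice_natCast,
            List.take_of_length_le (by simp)]
        rw [hA, hB]
      · have hin' : PySem.Chars.isIn pvM s = false := by simp [hin]
        have hfind : PySem.Chars.find s pvM = -1 := by
          by_contra hc
          rw [show PySem.Chars.isIn pvM s = (PySem.Chars.find s pvM != -1) from rfl] at hin'
          simp [hc] at hin'
        rw [pvCharA, if_pos (by simp [hin']), pvCharB, if_pos hfind]

lemma pv_lift_loop (lines : List String) :
    pvLinesLoop lines = (pvLoopA (lines.map String.toList)).map String.ofList := by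
  induction lines with
  | nil => simp [pvLinesLoop, pvLoopA]
  | cons line rest IH =>
    rw [pvLinesLoop, List.map_cons, pvLoopA]
    have hisin : PySem.Str.isIn "BUILDER_QUESTION:" line
        = PySem.Chars.isIn pvM line.toList := PySem.Str.isIn_eq _ _
    by_cases hin : PySem.Chars.isIn pvM line.toList = true
    · rw [if_pos (by rw [hisin]; exact hin), if_pos hin]
      have hsm := PySem.Str.splitMax?_map line "BUILDER_QUESTION:" 1
      rw [show ("BUILDER_QUESTION:".toList) = pvM from rfl,
        PySem.Chars.splitMax?, if_neg (by decide)] at hsm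
      cases hsp : PySem.Str.splitMax? line "BUILDER_QUESTION:" 1 with
      | none => rw [hsp] at hsm; simp at hsm
      | some parts =>
        rw [hsp] at hsm
        simp only [Option.map_some, Option.some.injEq] at hsm
        simp only [Option.getD_some, Option.map_some, Option.some.injEq]
        apply String.toList_inj.mp
        rw [PySem.Str.toList_strip, String.toList_ofList, ← hsm]
        congr 1
        rw [show ([] : List Char) = String.toList "" from rfl]
        exact (PySem.List.pyGetD_map String.toList parts 1 "").symm
    · rw [if_neg (by rw [hisin]; exact hin), if_neg hin, IH]

lemma pv_lift_A (output : String) :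
    extract_question_py output = (pvCharA output.toList).map String.ofList := by
  rw [extract_question_py, pvCharA]
  have hisin : PySem.Str.isIn "BUILDER_QUESTION:" output
      = PySem.Chars.isIn pvM output.toList := PySem.Str.isIn_eq _ _
  by_cases hin : PySem.Chars.isIn pvM output.toList = true
  · rw [if_neg (by rw [hisin, hin]; simp), if_neg (by rw [hin]; simp)]
    have hsm := PySem.Str.split?_map output "\n"
    rw [show ("\n".toList) = ['\n'] from rfl, PySem.Chars.split?, if_neg (by decide)] at hsm
    cases hsp : PySem.Str.split? output "\n" with
    | none => rw [hsp] at hsm; simp at hsm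
    | some lines =>
      rw [hsp] at hsm
      simp only [Option.map_some, Option.some.injEq] at hsm
      simp only [Option.getD_some]
      rw [pv_lift_loop, hsm]
  · rw [if_pos (by rw [hisin]; simp [hin]), if_pos (by simp [hin])]
    simp

lemma pv_lift_B (output : String) :
    extract_question_py_alt output = (pvCharB output.toList).map String.ofList := by
  rw [extract_question_py_alt, pvCharB]
  simp only [PySem.Str.find_eq, PySem.Str.findFrom_eq, PySem.Str.len_eq,
    show ("BUILDER_QUESTION:".toList) = pvM from rfl,
    show ("\n".toList) = ['\n'] from rfl]
  by_cases hf : PySem.Chars.find output.toList pvM = -1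
  · rw [if_pos hf, if_pos hf]
    simp
  · rw [if_neg hf, if_neg hf]
    simp only [Option.map_some, Option.some.injEq]
    apply String.toList_inj.mp
    rw [PySem.Str.toList_strip, String.toList_ofList, PySem.Str.toList_slice]
    rw [show ((pvM.length : Nat) : Int) = 17 from by decide]
    rw [PySem.Chars.slice_eq_listSlice]

-- ===== VERDICT (by name: the statement is the Claim_ definition above) =====
theorem extract_question_py_spec : Claim_equal_extract_question_py := by
  intro output _
  unfold Spec_extract_question_py
  rw [pv_lift_A, pv_lift_B, pv_char_main output.toList.length output.toList le_rfl]
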